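-- pv_equiv track=rewrite | github.com/ChaseSecurity/bandwidth_sharing | traffic_classifier_scripts/feature_engineering/train_and_test.py | separate_data_by_providers
-- ===== SOURCE A (Python) =====
-- def separate_data_by_providers(X, y, providers, train_providers, test_providers):
--     train_X, train_y, train_providers_list = [], [], []
--     test_X, test_y, test_providers_list = [], [], []
--
--     for x, label, provider in zip(X, y, providers):
--         if provider in train_providers:
--             train_X.append(x)
--             train_y.append(label)
--             train_providers_list.append(provider)
--         if provider in test_providers:  # 使用 if 而不是 elif
--             test_X.append(x)
--             test_y.append(label)
--             test_providers_list.append(provider)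
--
--     return train_X, train_y, train_providers_list, test_X, test_y, test_providers_list
-- ===== SOURCE B (Python) =====
-- def separate_data_by_providers(X, y, providers, train_providers, test_providers):
--     triples = list(zip(X, y, providers))
--     train = [t for t in triples if t[2] in train_providers]
--     test = [t for t in triples if t[2] in test_providers]
--     if train:
--         train_X, train_y, train_providers_list = map(list, zip(*train))
--     else:
--         train_X, train_y, train_providers_list = [], [], []
--     if test:
--         test_X, test_y, test_providers_list = map(list, zip(*test))
--     else:
--         test_X, test_y, test_providers_list = [], [], []
--     return train_X, train_y, train_providers_list, test_X, test_y, test_providers_list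
-- ===== Notes on version B (the rewrite author's own statement) =====
-- stated objective: alternative
-- what changed: Replaces the single loop that dispatches each sample into both groups with two independent filter passes over the zipped triples followed by an unzip (zip(*...)) of each group.
import Mathlib
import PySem

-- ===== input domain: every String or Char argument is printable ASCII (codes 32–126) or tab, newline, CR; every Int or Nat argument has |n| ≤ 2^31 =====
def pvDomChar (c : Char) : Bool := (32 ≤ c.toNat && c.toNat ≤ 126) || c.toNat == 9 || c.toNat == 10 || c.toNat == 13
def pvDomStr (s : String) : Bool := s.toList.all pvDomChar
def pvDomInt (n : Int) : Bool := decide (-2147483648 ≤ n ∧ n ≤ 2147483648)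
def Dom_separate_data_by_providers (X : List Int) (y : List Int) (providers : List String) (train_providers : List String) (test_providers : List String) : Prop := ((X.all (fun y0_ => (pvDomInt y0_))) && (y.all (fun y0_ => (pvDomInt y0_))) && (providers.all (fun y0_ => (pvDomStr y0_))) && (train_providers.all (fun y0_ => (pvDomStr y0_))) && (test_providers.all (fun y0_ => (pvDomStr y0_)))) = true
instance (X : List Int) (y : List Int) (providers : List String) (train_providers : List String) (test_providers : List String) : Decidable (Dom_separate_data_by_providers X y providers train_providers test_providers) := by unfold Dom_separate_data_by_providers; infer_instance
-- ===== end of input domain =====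

-- ===== PORT A =====
-- B is a different decomposition (two filter passes + unzip) of A's single dispatching loop; same cost, no speed claim.
def sdbpStep (train_providers test_providers : List String)
    (acc : List Int × List Int × List String × List Int × List Int × List String)
    (t : Int × Int × String) : List Int × List Int × List String × List Int × List Int × List String :=
  match acc, t with
  | (trX, trY, trP, teX, teY, teP), (x, label, provider) =>
    let (trX, trY, trP) :=
      if train_providers.contains provider then (trX ++ [x], trY ++ [label], trP ++ [provider])
      else (trX, trY, trP)
    let (teX, teY, teP) :=
      if test_providers.contains provider then (teX ++ [x], teY ++ [label], teP ++ [provider])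
      else (teX, teY, teP)
    (trX, trY, trP, teX, teY, teP)

def separate_data_by_providers (X : List Int) (y : List Int) (providers : List String) (train_providers : List String) (test_providers : List String) : List Int × List Int × List String × List Int × List Int × List String :=
  (X.zip (y.zip providers)).foldl (sdbpStep train_providers test_providers) ([], [], [], [], [], [])

-- ===== PORT B =====
def separate_data_by_providers_alt (X : List Int) (y : List Int) (providers : List String) (train_providers : List String) (test_providers : List String) : List Int × List Int × List String × List Int × List Int × List String :=
  let triples := X.zip (y.zip providers)
  let train := triples.filter (fun t => train_providers.contains t.2.2)
  let test := triples.filter (fun t => test_providers.contains t.2.2)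
  (train.map (fun t => t.1), train.map (fun t => t.2.1), train.map (fun t => t.2.2),
   test.map (fun t => t.1), test.map (fun t => t.2.1), test.map (fun t => t.2.2))

-- ===== PRECONDITION & SPEC =====
def Spec_separate_data_by_providers (X : List Int) (y : List Int) (providers : List String) (train_providers : List String) (test_providers : List String) (out : List Int × List Int × List String × List Int × List Int × List String) : Prop := out = separate_data_by_providers_alt X y providers train_providers test_providers
instance (X : List Int) (y : List Int) (providers : List String) (train_providers : List String) (test_providers : List String) (out : List Int × List Int × List String × List Int × List Int × List String) : Decidable (Spec_separate_data_by_providers X y providers train_providers test_providers out) := by unfold Spec_separate_data_by_providers; infer_instance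

-- ===== CLAIM (what is proved, stated in full; the proofs are below) =====
def Claim_equal_separate_data_by_providers : Prop := ∀ (X : List Int) (y : List Int) (providers : List String) (train_providers : List String) (test_providers : List String), Dom_separate_data_by_providers X y providers train_providers test_providers → Spec_separate_data_by_providers X y providers train_providers test_providers (separate_data_by_providers X y providers train_providers test_providers)

-- ===== LEMMAS AND PROOFS =====

lemma sdbp_loop_eq (tp sp : List String) (l : List (Int × Int × String))
    (a d : List Int) (b e : List Int) (c f : List String) :
    l.foldl (sdbpStep tp sp) (a, b, c, d, e, f) =
      (a ++ (l.filter (fun t => tp.contains t.2.2)).map (fun t => t.1),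
       b ++ (l.filter (fun t => tp.contains t.2.2)).map (fun t => t.2.1),
       c ++ (l.filter (fun t => tp.contains t.2.2)).map (fun t => t.2.2),
       d ++ (l.filter (fun t => sp.contains t.2.2)).map (fun t => t.1),
       e ++ (l.filter (fun t => sp.contains t.2.2)).map (fun t => t.2.1),
       f ++ (l.filter (fun t => sp.contains t.2.2)).map (fun t => t.2.2)) := by
  induction l generalizing a b c d e f with
  | nil => simp
  | cons hd tl ih =>
    obtain ⟨x, label, provider⟩ := hd
    simp only [List.foldl_cons, sdbpStep, List.filter_cons]
    by_cases h1 : provider ∈ tp <;> by_cases h2 : provider ∈ sp <;>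
      simp [h1, h2, ih, List.append_assoc]

-- ===== VERDICT (by name: the statement is the Claim_ definition above) =====
theorem separate_data_by_providers_spec : Claim_equal_separate_data_by_providers := by
  intro X y providers tp sp _
  unfold Spec_separate_data_by_providers separate_data_by_providers separate_data_by_providers_alt
  simp [sdbp_loop_eq]
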